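-- pv_equiv track=rewrite | github.com/ByungKwanLee/CoLLaVO | collavo/utils/utils.py | classes2string
-- ===== SOURCE A (Python) =====
-- def classes2string(nice_seg_info_list):
--     classes = [nice_seg_info['class'] for nice_seg_info in nice_seg_info_list]
--     count = {}
--     out = ''
--     for i, x in enumerate(classes):
--         if x in count.keys():
--             count[x]+=1
--         else:
--             count.update({x: 1})
--         out+=f"#{count[x]} {x}"
--         if i!=len(classes)-1: out+=', '
--     return out
-- ===== SOURCE B (Python) =====
-- def classes2string(nice_seg_info_list):
--     classes = [d['class'] for d in nice_seg_info_list]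
--     # group the positions of each class, number within each group, scatter the ranks
--     positions = {}
--     for i, x in enumerate(classes):
--         positions.setdefault(x, []).append(i)
--     nums = [0] * len(classes)
--     for idxs in positions.values():
--         for k, i in enumerate(idxs, 1):
--             nums[i] = k
--     return ', '.join(f"#{n} {x}" for n, x in zip(nums, classes))
-- ===== Notes on version B (the rewrite author's own statement) =====
-- stated objective: alternative
-- what changed: Replaces A's single left-to-right pass maintaining a running count dict and manual trailing-separator logic with a three-stage group-and-scatter algorithm: first group the positions of each class into per-class index lists, then number each group 1..k and scatter those ranks into an array, finally join the zipped (rank, class) labels with ', '.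
import Mathlib
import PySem

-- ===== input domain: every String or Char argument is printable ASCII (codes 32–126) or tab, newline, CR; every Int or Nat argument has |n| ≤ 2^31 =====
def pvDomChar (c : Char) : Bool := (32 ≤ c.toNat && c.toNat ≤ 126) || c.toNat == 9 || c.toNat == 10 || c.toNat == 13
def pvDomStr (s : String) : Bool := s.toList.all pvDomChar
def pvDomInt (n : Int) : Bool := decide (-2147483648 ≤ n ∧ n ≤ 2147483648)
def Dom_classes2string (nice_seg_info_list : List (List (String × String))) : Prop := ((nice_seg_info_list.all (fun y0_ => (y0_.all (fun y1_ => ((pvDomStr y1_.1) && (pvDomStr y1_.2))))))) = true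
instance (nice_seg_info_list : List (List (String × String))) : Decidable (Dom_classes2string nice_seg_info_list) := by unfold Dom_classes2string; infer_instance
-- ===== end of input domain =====

-- B replaces A's running count dict and manual trailing-separator logic by a group-and-scatter
-- algorithm: group positions per class, number each group, scatter the ranks, join (objective: alternative).

-- ===== PORT A =====
-- A-side helper: the body of A's for-loop (state = (count dict, out string)).
-- `nice_seg_info['class']` is ported as Dict.getD with a dummy default; Pre_ excludes the
-- missing-key inputs, on which Python raises KeyError, so the default never fires under Pre_.
def classes2stringStep (n : Nat) (st : PySem.Dict String Int × String) (p : Int × String) :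
    PySem.Dict String Int × String :=
  let x := p.2
  let count := if st.1.contains x then st.1.modify x 0 (· + 1) else st.1.insert x 1
  let out := st.2 ++ "#" ++ PySem.Int.toStr (count.getD x 0) ++ " " ++ x
  let out := if p.1 ≠ (n : Int) - 1 then out ++ ", " else out
  (count, out)

def classes2string (nice_seg_info_list : List (List (String × String))) : String :=
  let classes := nice_seg_info_list.map (fun d => (PySem.Dict.mk d).getD "class" "")
  ((PySem.List.enumerate classes 0).foldl (classes2stringStep classes.length)
    (PySem.Dict.empty, "")).2

-- ===== PORT B =====
def classes2string_alt (nice_seg_info_list : List (List (String × String))) : String :=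
  let classes := nice_seg_info_list.map (fun d => (PySem.Dict.mk d).getD "class" "")
  -- positions.setdefault(x, []).append(i)  ==  positions[x] = positions.get(x, []) + [i]
  let positions := (PySem.List.enumerate classes 0).foldl
      (fun d p => d.modify p.2 [] (· ++ [p.1])) PySem.Dict.empty
  let nums := positions.values.foldl
      (fun ns idxs => (PySem.List.enumerate idxs 1).foldl
          (fun ns q => PySem.List.pySetD ns q.2 q.1) ns)
      (List.replicate classes.length (0 : Int))
  PySem.Str.join ", " ((nums.zip classes).map
    (fun p => "#" ++ PySem.Int.toStr p.1 ++ " " ++ p.2))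

-- ===== PRECONDITION & SPEC =====
-- Pre_ excludes exactly the inputs on which A (and B alike) raises KeyError: some element
-- without a 'class' key.
def Pre_classes2string (nice_seg_info_list : List (List (String × String))) : Prop :=
  ∀ d ∈ nice_seg_info_list, d.any (fun p => p.1 == "class") = true

instance (nice_seg_info_list : List (List (String × String))) : Decidable (Pre_classes2string nice_seg_info_list) := by unfold Pre_classes2string; infer_instance

def pvWitness_classes2string : (List (List (String × String))) :=
  [[("class", "cat")], [("class", "dog"), ("score", "3")], [("class", "cat")]]

def Spec_classes2string (nice_seg_info_list : List (List (String × String))) (out : String) : Prop := out = classes2string_alt nice_seg_info_list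
instance (nice_seg_info_list : List (List (String × String))) (out : String) : Decidable (Spec_classes2string nice_seg_info_list out) := by unfold Spec_classes2string; infer_instance

-- ===== CLAIM (what is proved, stated in full; the proofs are below) =====
def Claim_equal_classes2string : Prop := ∀ (nice_seg_info_list : List (List (String × String))), Dom_classes2string nice_seg_info_list → Pre_classes2string nice_seg_info_list → Spec_classes2string nice_seg_info_list (classes2string nice_seg_info_list)

-- ===== LEMMAS AND PROOFS =====

-- Proof-side common spec: the concatenation of labels-with-separators for the suffix of cs
-- starting at position j, the occurrence number read off as a prefix count.
def specStr (cs : List String) : List String → Nat → String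
  | [], _ => ""
  | x :: rest, j =>
    "#" ++ PySem.Int.toStr (((cs.take (j + 1)).count x : Int)) ++ " " ++ x
      ++ (if (j : Int) ≠ (cs.length : Int) - 1 then ", " else "") ++ specStr cs rest (j + 1)

-- A's step always updates the dict like `modify x 0 (+1)`, whichever branch fires.
theorem step_dict_eq (d : PySem.Dict String Int) (x : String) :
    (if d.contains x then d.modify x 0 (· + 1) else d.insert x 1) = d.modify x 0 (· + 1) := by
  by_cases h : d.contains x = true
  · simp [h]
  · have hf : d.contains x = false := by simpa using h
    have h2 : d.get? x = none := by
      rw [PySem.Dict.get?_eq_none_iff_contains]; simp [hf]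
    simp [hf, PySem.Dict.modify, PySem.Dict.getD, h2]

theorem foldA (cs : List String) :
    ∀ (rest : List String) (j : Nat) (d : PySem.Dict String Int) (s : String),
      rest = cs.drop j → (∀ y, d.getD y 0 = ((cs.take j).count y : Int)) →
      ((PySem.List.enumerate rest (j : Int)).foldl (classes2stringStep cs.length) (d, s)).2
        = s ++ specStr cs rest j := by
  intro rest
  induction rest with
  | nil => intro j d s _ _; simp [specStr]
  | cons x rest ih =>
    intro j d s hrest hd
    have hj : j < cs.length := by
      by_contra hle
      have : cs.drop j = [] := List.drop_eq_nil_of_le (by omega)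
      rw [this] at hrest; exact absurd hrest (by simp)
    have hx : cs[j] = x := by
      have := List.drop_eq_getElem_cons hj
      rw [this] at hrest
      exact (List.cons.injEq _ _ _ _ ▸ hrest).1.symm
    have hrest' : rest = cs.drop (j + 1) := by
      have := List.drop_eq_getElem_cons hj
      rw [this] at hrest
      exact (List.cons.injEq _ _ _ _ ▸ hrest).2
    have hcount : ∀ y, (cs.take (j + 1)).count y
        = (cs.take j).count y + (if y = x then 1 else 0) := by
      intro y
      rw [List.take_add_one]
      have : cs[j]? = some x := by rw [List.getElem?_eq_getElem hj, hx]
      rw [this]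
      simp [List.count_append, List.count_cons]
      by_cases hxy : x = y
      · simp [hxy]
      · simp [hxy]
        exact fun h => hxy h.symm
    have hd' : ∀ y, (d.modify x 0 (· + 1)).getD y 0 = ((cs.take (j + 1)).count y : Int) := by
      intro y
      rw [PySem.Dict.getD_modify, hcount y]
      by_cases hy : y = x
      · simp [hy, hd x]
      · simp [hy, hd y]
    rw [PySem.List.enumerate_cons, List.foldl_cons]
    have hstep : classes2stringStep cs.length (d, s) ((j : Int), x)
        = (d.modify x 0 (· + 1),
           (if (j : Int) ≠ (cs.length : Int) - 1
            then s ++ "#" ++ PySem.Int.toStr (((cs.take (j + 1)).count x : Int)) ++ " " ++ x ++ ", "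
            else s ++ "#" ++ PySem.Int.toStr (((cs.take (j + 1)).count x : Int)) ++ " " ++ x)) := by
      simp only [classes2stringStep, step_dict_eq, PySem.Dict.getD_modify_self]
      rw [hd x, hcount x]
      simp
    rw [hstep]
    have hcast : (j : Int) + 1 = ((j + 1 : Nat) : Int) := by push_cast; ring
    rw [hcast, ih (j + 1) _ _ hrest' hd']
    simp only [specStr]
    split_ifs with h <;>
      (apply String.toList_inj.mp; simp [String.toList_append])

-- ---- B-side: the grouping, the scatter, and the join ----

-- The group of a class x: the (Int) positions at which x occurs, in increasing order.
def grp (cs : List String) (x : String) : List Int :=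
  ((PySem.List.enumerate cs 0).filter (fun p => p.2 == x)).map (·.1)

-- B's reference label once the rank is known to be the prefix count.
def refLabel (cs : List String) (p : Int × String) : String :=
  "#" ++ PySem.Int.toStr (((cs.take (p.1.toNat + 1)).count p.2 : Int)) ++ " " ++ p.2

theorem positions_getD (cs : List String) (x : String) :
    ((PySem.List.enumerate cs 0).foldl (fun d p => d.modify p.2 [] (· ++ [p.1]))
      PySem.Dict.empty).getD x [] = grp cs x := by
  have h : (PySem.List.enumerate cs 0).foldl (fun d p => d.modify p.2 [] (· ++ [p.1]))
      PySem.Dict.empty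
      = ((PySem.List.enumerate cs 0).map (fun p => (p.2, p.1))).foldl
          (fun d p => d.modify p.1 [] (· ++ [p.2])) PySem.Dict.empty := by
    rw [List.foldl_map]
  rw [h, PySem.Dict.getD_foldl_modify_append]
  simp [grp, List.filter_map, Function.comp_def]

theorem mem_grp_iff (cs : List String) (x : String) (j : Nat) (hj : j < cs.length) :
    ((j : Int) ∈ grp cs x) ↔ cs[j] = x := by
  simp only [grp, List.mem_map, List.mem_filter, PySem.List.mem_enumerate_iff]
  constructor
  · rintro ⟨p, ⟨⟨k, hk, rfl⟩, hpx⟩, hp1⟩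
    simp at hpx hp1
    have : k = j := by omega
    subst this; exact hpx
  · intro hx
    exact ⟨((j : Int), cs[j]), ⟨⟨j, hj, by simp⟩, by simp [hx]⟩, rfl⟩

theorem grp_elems (cs : List String) (x : String) :
    ∀ i ∈ grp cs x, ∃ k : Nat, k < cs.length ∧ i = (k : Int) := by
  intro i hi
  simp only [grp, List.mem_map, List.mem_filter, PySem.List.mem_enumerate_iff] at hi
  obtain ⟨p, ⟨⟨k, hk, rfl⟩, -⟩, hp1⟩ := hi
  exact ⟨k, hk, by simp [← hp1]⟩

theorem grp_nodup (cs : List String) (x : String) : (grp cs x).Nodup := by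
  have h := PySem.List.pairwise_lt_enumerate cs 0
  have h2 := h.filter (fun p => p.2 == x)
  have h3 : (grp cs x).Pairwise (· < ·) := by
    rw [grp, List.pairwise_map]; exact h2
  exact h3.nodup

theorem idxOf_grp (x : String) :
    ∀ (cs : List String) (s : Int) (j : Nat) (hj : j < cs.length), cs[j]'hj = x →
      (((PySem.List.enumerate cs s).filter (fun p => p.2 == x)).map (·.1)).idxOf (s + j)
        = (cs.take j).count x := by
  intro cs
  induction cs with
  | nil => intro s j hj; simp at hj
  | cons c rest ih =>
    intro s j hj hx
    rw [PySem.List.enumerate_cons]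
    cases j with
    | zero =>
      simp at hx
      subst hx
      simp
    | succ k =>
      have hk : k < rest.length := by simpa using hj
      have hx' : rest[k]'hk = x := by simpa using hx
      have ihk := ih (s + 1) k hk hx'
      by_cases hc : c = x
      · subst hc
        simp only [List.filter_cons]
        simp only [beq_self_eq_true, if_pos, List.map_cons]
        rw [List.idxOf_cons]
        have hne : (s == s + (k + 1 : Nat)) = false := by
          simp; omega
        rw [hne]
        simp only [List.take_succ_cons, List.count_cons]
        have : s + ((k + 1 : Nat) : Int) = (s + 1) + (k : Nat) := by push_cast; ring
        rw [this, ihk]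
        simp
      · simp only [List.filter_cons]
        have : (c == x) = false := by simpa using hc
        rw [this]
        simp only [Bool.false_eq_true, if_false, List.take_succ_cons, List.count_cons]
        have h2 : s + ((k + 1 : Nat) : Int) = (s + 1) + (k : Nat) := by push_cast; ring
        rw [h2, ihk]
        simp [hc]

theorem scatter_length :
    ∀ (idxs : List Int) (s : Int) (ns : List Int),
      ((PySem.List.enumerate idxs s).foldl (fun ns q => PySem.List.pySetD ns q.2 q.1) ns).length
        = ns.length := by
  intro idxs
  induction idxs with
  | nil => intro s ns; simp
  | cons i rest ih =>
    intro s ns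
    rw [PySem.List.enumerate_cons, List.foldl_cons, ih]
    exact PySem.List.length_pySetD ns i s

theorem scatter_untouched (j : Nat) :
    ∀ (idxs : List Int) (s : Int) (ns : List Int),
      (∀ i ∈ idxs, 0 ≤ i) → (j : Int) ∉ idxs →
      ((PySem.List.enumerate idxs s).foldl (fun ns q => PySem.List.pySetD ns q.2 q.1) ns)[j]?
        = ns[j]? := by
  intro idxs
  induction idxs with
  | nil => intro s ns _ _; simp
  | cons i rest ih =>
    intro s ns hpos hj
    rw [PySem.List.enumerate_cons, List.foldl_cons]
    have hi : 0 ≤ i := hpos i (by simp)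
    have hji : (j : Int) ≠ i := fun h => hj (by simp [← h])
    rw [ih (s+1) _ (fun i hi => hpos i (by simp [hi])) (fun h => hj (by simp [h]))]
    simp only [PySem.List.pySetD_of_nonneg ns s hi, List.getElem?_set]
    have : i.toNat ≠ j := by omega
    rw [if_neg this]

theorem scatter_hit (j : Nat) :
    ∀ (idxs : List Int) (s : Int) (ns : List Int),
      idxs.Nodup → (∀ i ∈ idxs, 0 ≤ i) → (j : Int) ∈ idxs → j < ns.length →
      ((PySem.List.enumerate idxs s).foldl (fun ns q => PySem.List.pySetD ns q.2 q.1) ns)[j]?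
        = some (s + (idxs.idxOf (j : Int) : Int)) := by
  intro idxs
  induction idxs with
  | nil => intro s ns _ _ h; simp at h
  | cons i rest ih =>
    intro s ns hnd hpos hj hlen
    rw [PySem.List.enumerate_cons, List.foldl_cons]
    have hi : 0 ≤ i := hpos i (by simp)
    by_cases hji : (j : Int) = i
    · subst hji
      have hnr : (j : Int) ∉ rest := (List.nodup_cons.mp hnd).1
      rw [scatter_untouched j rest (s+1) _ (fun i hi => hpos i (by simp [hi])) hnr]
      rw [PySem.List.pySetD_of_nonneg ns _ hi, List.getElem?_set]
      simp [hlen]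
    · have hjr : (j : Int) ∈ rest := by
        rcases List.mem_cons.mp hj with h | h
        · exact absurd h hji
        · exact h
      have hlen' : j < (PySem.List.pySetD ns i s).length := by
        rw [PySem.List.length_pySetD]; exact hlen
      rw [ih (s+1) _ (List.nodup_cons.mp hnd).2 (fun i hi => hpos i (by simp [hi])) hjr hlen']
      rw [List.idxOf_cons]
      have : (i == (j : Int)) = false := by simp; exact fun h => hji h.symm
      rw [this]
      simp only [cond_false]
      congr 1
      push_cast
      ring

theorem scatterAll_length :
    ∀ (gs : List (List Int)) (ns : List Int),
      (gs.foldl (fun ns idxs => (PySem.List.enumerate idxs 1).foldl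
          (fun ns q => PySem.List.pySetD ns q.2 q.1) ns) ns).length = ns.length := by
  intro gs
  induction gs with
  | nil => intro ns; simp
  | cons g rest ih =>
    intro ns
    rw [List.foldl_cons, ih, scatter_length]

theorem scatterAll_untouched (j : Nat) :
    ∀ (gs : List (List Int)) (ns : List Int),
      (∀ g' ∈ gs, ∀ i ∈ g', 0 ≤ i) → (∀ g' ∈ gs, (j : Int) ∉ g') →
      (gs.foldl (fun ns idxs => (PySem.List.enumerate idxs 1).foldl
          (fun ns q => PySem.List.pySetD ns q.2 q.1) ns) ns)[j]? = ns[j]? := by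
  intro gs
  induction gs with
  | nil => intro ns _ _; simp
  | cons g rest ih =>
    intro ns hpos hnot
    rw [List.foldl_cons, ih _ (fun g' h => hpos g' (by simp [h])) (fun g' h => hnot g' (by simp [h]))]
    exact scatter_untouched j g 1 ns (hpos g (by simp)) (hnot g (by simp))

theorem scatterAll_hit (j : Nat) :
    ∀ (gs : List (List Int)) (ns : List Int) (g : List Int),
      (∀ g' ∈ gs, ∀ i ∈ g', 0 ≤ i) → g.Nodup →
      gs.Pairwise (fun g g' => ∀ i : Int, i ∈ g → i ∉ g') →
      g ∈ gs → (j : Int) ∈ g → j < ns.length →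
      (gs.foldl (fun ns idxs => (PySem.List.enumerate idxs 1).foldl
          (fun ns q => PySem.List.pySetD ns q.2 q.1) ns) ns)[j]?
        = some (1 + (g.idxOf (j : Int) : Int)) := by
  intro gs
  induction gs with
  | nil => intro ns g _ _ _ h; simp at h
  | cons g0 rest ih =>
    intro ns g hpos hnd hpw hg hj hlen
    rw [List.foldl_cons]
    have hpw' := (List.pairwise_cons.mp hpw)
    by_cases hg0 : (j : Int) ∈ g0
    · have hgeq : g = g0 := by
        rcases List.mem_cons.mp hg with h | h
        · exact h
        · exact absurd hj (hpw'.1 g h (j : Int) hg0)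
      subst hgeq
      rw [scatterAll_untouched j rest _ (fun g' h => hpos g' (by simp [h]))
        (fun g' h => hpw'.1 g' h (j : Int) hg0)]
      exact scatter_hit j g 1 ns hnd (hpos g (by simp)) hg0 hlen
    · have hgr : g ∈ rest := by
        rcases List.mem_cons.mp hg with h | h
        · subst h; exact absurd hj hg0
        · exact h
      have hlen' : j < ((PySem.List.enumerate g0 1).foldl
          (fun ns q => PySem.List.pySetD ns q.2 q.1) ns).length := by
        rw [scatter_length]; exact hlen
      exact ih _ g (fun g' h => hpos g' (by simp [h])) hnd hpw'.2 hgr hj hlen'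

theorem positions_values (cs : List String) :
    ((PySem.List.enumerate cs 0).foldl (fun d p => d.modify p.2 [] (· ++ [p.1]))
      PySem.Dict.empty).values = (PySem.Set.ofList cs).map (grp cs) := by
  set d := (PySem.List.enumerate cs 0).foldl (fun d p => d.modify p.2 [] (· ++ [p.1]))
      PySem.Dict.empty with hd
  have hkeys : d.keys = PySem.Set.ofList cs := by
    rw [hd]
    rw [PySem.Dict.keys_foldl_modify_key (PySem.List.enumerate cs 0) (fun p => p.2) []
      (fun _ p => (· ++ [p.1])) PySem.Dict.empty]
    rw [PySem.List.map_snd_enumerate]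
    simp [PySem.Dict.keys_empty, PySem.Set.update_nil_left]
  have hnd : d.keys.Nodup := by rw [hkeys]; exact PySem.Set.nodup_ofList cs
  rw [PySem.Dict.values_eq_map_keys d hnd []]
  rw [hkeys]
  apply List.map_congr_left
  intro x _
  exact positions_getD cs x

theorem nums_getElem (cs : List String) (j : Nat) (hj : j < cs.length) :
    (((((PySem.List.enumerate cs 0).foldl
          (fun d p => d.modify p.2 [] (· ++ [p.1])) PySem.Dict.empty).values).foldl
        (fun ns idxs => (PySem.List.enumerate idxs 1).foldl
          (fun ns q => PySem.List.pySetD ns q.2 q.1) ns)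
        (List.replicate cs.length (0 : Int))))[j]?
      = some (((cs.take (j + 1)).count (cs[j]) : Int)) := by
  rw [positions_values]
  have hg : (j : Int) ∈ grp cs (cs[j]) := (mem_grp_iff cs _ j hj).mpr rfl
  have hmem : grp cs (cs[j]) ∈ (PySem.Set.ofList cs).map (grp cs) :=
    List.mem_map_of_mem (by rw [PySem.Set.mem_ofList]; exact List.getElem_mem hj)
  have hpos : ∀ g' ∈ (PySem.Set.ofList cs).map (grp cs), ∀ i ∈ g', 0 ≤ i := by
    intro g' hg' i hi
    obtain ⟨x, -, rfl⟩ := List.mem_map.mp hg'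
    obtain ⟨k, -, rfl⟩ := grp_elems cs x i hi
    positivity
  have hpw : ((PySem.Set.ofList cs).map (grp cs)).Pairwise
      (fun g g' => ∀ i : Int, i ∈ g → i ∉ g') := by
    rw [List.pairwise_map]
    apply List.Pairwise.imp ?_ (PySem.Set.nodup_ofList cs)
    intro x x' hne i hix hix'
    obtain ⟨k, hk, rfl⟩ := grp_elems cs x i hix
    rw [mem_grp_iff cs x k hk] at hix
    rw [mem_grp_iff cs x' k hk] at hix'
    exact hne (hix ▸ hix')
  rw [scatterAll_hit j _ _ (grp cs (cs[j])) hpos (grp_nodup cs _) hpw hmem hg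
    (by rw [List.length_replicate]; exact hj)]
  have hidx : (grp cs (cs[j])).idxOf (j : Int) = (cs.take j).count (cs[j]) := by
    have := idxOf_grp (cs[j]) cs 0 j hj rfl
    rw [grp]
    rw [show ((j : Nat) : Int) = 0 + (j : Nat) by ring]
    exact this
  rw [hidx]
  congr 1
  have hsucc : (cs.take (j + 1)).count (cs[j]) = (cs.take j).count (cs[j]) + 1 := by
    have h : cs.take (j + 1) = cs.take j ++ [cs[j]] := by
      rw [List.take_add_one, List.getElem?_eq_getElem hj]; rfl
    rw [h, List.count_append]
    simp
  rw [hsucc]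
  push_cast
  ring

theorem joinB (cs : List String) :
    ∀ (rest : List String) (j : Nat), j + rest.length = cs.length →
      PySem.Str.join ", " ((PySem.List.enumerate rest (j : Int)).map (refLabel cs))
        = specStr cs rest j := by
  intro rest
  induction rest with
  | nil =>
    intro j _
    apply String.toList_inj.mp
    simp [PySem.Str.toList_join, PySem.List.enumerate_nil, PySem.Chars.join_nil, specStr]
  | cons x rest ih =>
    intro j hlen
    have hlab : refLabel cs ((j : Int), x)
        = "#" ++ PySem.Int.toStr (((cs.take (j + 1)).count x : Int)) ++ " " ++ x := by
      simp [refLabel]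
    cases rest with
    | nil =>
      have hj : (j : Int) = (cs.length : Int) - 1 := by
        simp at hlen; omega
      simp only [PySem.List.enumerate_cons, PySem.List.enumerate_nil, List.map_cons,
        List.map_nil, specStr]
      rw [hlab, if_neg (by simp [hj])]
      apply String.toList_inj.mp
      simp [PySem.Str.toList_join, PySem.Chars.join_singleton, String.toList_append]
    | cons y rest' =>
      have hj : (j : Int) ≠ (cs.length : Int) - 1 := by
        simp at hlen; omega
      have hcast : (j : Int) + 1 = ((j + 1 : Nat) : Int) := by push_cast; ring
      have hlen' : (j + 1) + (y :: rest').length = cs.length := by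
        simp at hlen ⊢; omega
      have ihy := ih (j + 1) hlen'
      apply String.toList_inj.mp
      rw [PySem.List.enumerate_cons, List.map_cons, hcast]
      simp only [PySem.List.enumerate_cons, List.map_cons]
      have hcons : ∀ (p : String) (q : String) (r : List String),
          (PySem.Str.join ", " (p :: q :: r)).toList
            = p.toList ++ (", " : String).toList ++ (PySem.Str.join ", " (q :: r)).toList := by
        intro p q r
        simp [PySem.Str.toList_join, PySem.Chars.join_cons_cons]
      rw [hcons]
      rw [← List.map_cons, ← PySem.List.enumerate_cons, ihy]
      simp only [specStr]
      rw [hlab, if_pos hj]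
      simp

theorem zipmap_eq (cs : List String) :
    ((((((PySem.List.enumerate cs 0).foldl
          (fun d p => d.modify p.2 [] (· ++ [p.1])) PySem.Dict.empty).values).foldl
        (fun ns idxs => (PySem.List.enumerate idxs 1).foldl
          (fun ns q => PySem.List.pySetD ns q.2 q.1) ns)
        (List.replicate cs.length (0 : Int)))).zip cs).map
      (fun p => "#" ++ PySem.Int.toStr p.1 ++ " " ++ p.2)
      = (PySem.List.enumerate cs 0).map (refLabel cs) := by
  set nums := ((((PySem.List.enumerate cs 0).foldl
          (fun d p => d.modify p.2 [] (· ++ [p.1])) PySem.Dict.empty).values).foldl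
        (fun ns idxs => (PySem.List.enumerate idxs 1).foldl
          (fun ns q => PySem.List.pySetD ns q.2 q.1) ns)
        (List.replicate cs.length (0 : Int))) with hnums
  have hlen : nums.length = cs.length := by
    rw [hnums, scatterAll_length, List.length_replicate]
  apply List.ext_getElem
  · simp [hlen, PySem.List.length_enumerate]
  · intro j h1 h2
    have hj : j < cs.length := by simpa [hlen] using h2
    have hnj : nums[j]'(by omega) = ((cs.take (j + 1)).count (cs[j]) : Int) := by
      have := nums_getElem cs j hj
      rw [← hnums] at this
      have h' := List.getElem?_eq_getElem (l := nums) (i := j) (by omega)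
      rw [h'] at this
      exact Option.some.injEq _ _ ▸ this
    simp only [List.getElem_map, List.getElem_zip, PySem.List.getElem_enumerate]
    rw [hnj]
    simp [refLabel]

-- ===== VERDICT (by name: the statement is the Claim_ definition above) =====
theorem classes2string_spec : Claim_equal_classes2string := by
  intro l _ _
  unfold Spec_classes2string
  set cs := l.map (fun d => (PySem.Dict.mk d).getD "class" "") with hcs
  have hAdef : classes2string l
      = ((PySem.List.enumerate cs 0).foldl (classes2stringStep cs.length)
          (PySem.Dict.empty, "")).2 := rfl
  have hBdef : classes2string_alt l
      = PySem.Str.join ", " ((((((PySem.List.enumerate cs 0).foldl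
            (fun d p => d.modify p.2 [] (· ++ [p.1])) PySem.Dict.empty).values).foldl
            (fun ns idxs => (PySem.List.enumerate idxs 1).foldl
              (fun ns q => PySem.List.pySetD ns q.2 q.1) ns)
            (List.replicate cs.length (0 : Int))).zip cs).map
          (fun p => "#" ++ PySem.Int.toStr p.1 ++ " " ++ p.2)) := rfl
  have hA := foldA cs cs 0 PySem.Dict.empty "" (by simp) (by intro y; simp)
  have hB := joinB cs cs 0 (by simp)
  simp only [Nat.cast_zero] at hA hB
  rw [hAdef, hBdef, hA, zipmap_eq, hB]
  apply String.toList_inj.mp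
  simp
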